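-- pv_equiv track=rewrite | github.com/alex123012/Bioinf_HW | third_HW/Neddleman.py | print_align
-- ===== SOURCE A (Python) =====
-- def print_align(i, j, upper, lower, mid, s, x, y):
--     if i == 0 and j == 0:
--         return upper[::-1], lower[::-1], mid[::-1]
--
--     ind = s[i][j][1]
--
--     if ind == 'dig':
--         upper += x[j - 1]
--         lower += y[i - 1]
--
--         mid += '|' if upper[-1] == lower[-1] else '.'
--
--         return print_align(i - 1, j - 1, upper, lower, mid, s, x, y)
--     elif ind == 'up':
--         upper += '-'
--         mid += ' '
--         lower += y[i - 1]
--         return print_align(i - 1, j, upper, lower, mid, s, x, y)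
--     elif ind == 'left':
--         upper += x[j - 1]
--         mid += ' '
--         lower += '-'
--         return print_align(i, j - 1, upper, lower, mid, s, x, y)
--     else:
--         if i == 0:
--             upper += x[j - 1]
--             mid += ' '
--             lower += '-'
--             return print_align(i, j - 1, upper, lower, mid, s, x, y)
--         elif j == 0:
--             upper += '-'
--             mid += ' '
--             lower += y[i - 1]
--             return print_align(i - 1, j, upper, lower, mid, s, x, y)
-- ===== SOURCE B (Python) =====
-- def print_align(i, j, upper, lower, mid, s, x, y):
--     # Two-stage decomposition: stage 1 walks the matrix recording only the
--     # backtrace moves (tag, i, j); stage 2 turns each move into a column of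
--     # three characters, then everything is joined once.
--     moves = []
--     while not (i == 0 and j == 0):
--         ind = s[i][j][1]
--         if ind == 'dig':
--             moves.append(('d', i, j))
--             i -= 1
--             j -= 1
--         elif ind == 'up' or (ind != 'left' and j == 0):
--             moves.append(('u', i, j))
--             i -= 1
--         elif ind == 'left' or i == 0:
--             moves.append(('l', i, j))
--             j -= 1
--         else:
--             return None
--     cols = []
--     for t, mi, mj in moves:
--         if t == 'd':
--             cu, cl = x[mj - 1], y[mi - 1]
--             cols.append((cu, cl, '|' if cu == cl else '.'))
--         elif t == 'u':
--             cols.append(('-', y[mi - 1], ' '))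
--         else:
--             cols.append((x[mj - 1], '-', ' '))
--     cols.reverse()
--     return (''.join(c[0] for c in cols) + upper[::-1],
--             ''.join(c[1] for c in cols) + lower[::-1],
--             ''.join(c[2] for c in cols) + mid[::-1])
-- ===== Notes on version B (the rewrite author's own statement) =====
-- stated objective: alternative
-- what changed: Two-stage decomposition: a first pass records only the backtrace moves (tag, i, j), a second pass maps each move to a column of three characters and the strings are joined once, instead of A's tail recursion that grows three strings by += at every step.
import Mathlib
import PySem

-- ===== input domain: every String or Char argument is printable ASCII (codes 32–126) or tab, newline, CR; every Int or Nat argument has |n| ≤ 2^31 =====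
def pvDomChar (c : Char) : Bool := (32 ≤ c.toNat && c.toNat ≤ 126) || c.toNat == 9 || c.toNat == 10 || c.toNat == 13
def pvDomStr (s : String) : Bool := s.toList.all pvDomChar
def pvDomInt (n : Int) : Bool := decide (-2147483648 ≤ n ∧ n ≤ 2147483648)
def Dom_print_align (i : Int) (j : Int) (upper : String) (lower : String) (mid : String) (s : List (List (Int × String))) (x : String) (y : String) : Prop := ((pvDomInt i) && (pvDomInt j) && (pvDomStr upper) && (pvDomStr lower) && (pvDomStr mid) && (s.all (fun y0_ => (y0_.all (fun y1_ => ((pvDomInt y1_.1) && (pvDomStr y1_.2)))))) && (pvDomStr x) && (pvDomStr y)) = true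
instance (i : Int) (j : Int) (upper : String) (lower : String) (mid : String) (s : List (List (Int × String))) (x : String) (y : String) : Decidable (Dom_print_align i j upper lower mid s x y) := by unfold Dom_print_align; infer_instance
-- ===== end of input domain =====

-- B replaces A's string-growing tail recursion by a two-stage pipeline: a first pass that records
-- only the backtrace moves, and a second pass mapping moves to character columns joined once
-- (objective: alternative).


-- t[::-1]  (step -1 never raises, so the .getD default is never used)
def pyRev (t : String) : String := (PySem.Str.slice? t none none (-1)).getD ""

-- ===== PORT A =====
-- Structural fuel recursion ((i+1).toNat+(j+1).toNat steps always suffice; when fuel runs out both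
-- i and j are negative and the body would return the totality default anyway): totality device only.
def printAlignGo : Nat → Int → Int → String → String → String → List (List (Int × String)) → String → String → String × String × String
  | 0, _, _, _, _, _, _, _, _ => ("", "", "")
  | fuel+1, i, j, upper, lower, mid, s, x, y =>
    if i = 0 ∧ j = 0 then
      (pyRev upper, pyRev lower, pyRev mid)
    else if i < 0 ∨ j < 0 then ("", "", "")     -- totality guard only; reachable only outside Pre_ (Python wraps/raises there)
    else
      match (PySem.List.pyGet? s i).bind (fun row => PySem.List.pyGet? row j) with
      | none => ("", "", "")                    -- Python: IndexError, excluded by Pre_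
      | some cell =>
        if cell.2 = "dig" then
          match PySem.Str.pyGet? x (j - 1), PySem.Str.pyGet? y (i - 1) with
          | some cx, some cy =>
            let upper' := upper.push cx
            let lower' := lower.push cy
            let mid' := mid.push (if PySem.Str.pyGet? upper' (-1) = PySem.Str.pyGet? lower' (-1) then '|' else '.')
            printAlignGo fuel (i-1) (j-1) upper' lower' mid' s x y
          | _, _ => ("", "", "")                -- Python: IndexError, excluded by Pre_
        else if cell.2 = "up" then
          match PySem.Str.pyGet? y (i - 1) with
          | some cy => printAlignGo fuel (i-1) j (upper.push '-') (lower.push cy) (mid.push ' ') s x y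
          | none => ("", "", "")
        else if cell.2 = "left" then
          match PySem.Str.pyGet? x (j - 1) with
          | some cx => printAlignGo fuel i (j-1) (upper.push cx) (lower.push '-') (mid.push ' ') s x y
          | none => ("", "", "")
        else if i = 0 then
          match PySem.Str.pyGet? x (j - 1) with
          | some cx => printAlignGo fuel i (j-1) (upper.push cx) (lower.push '-') (mid.push ' ') s x y
          | none => ("", "", "")
        else if j = 0 then
          match PySem.Str.pyGet? y (i - 1) with
          | some cy => printAlignGo fuel (i-1) j (upper.push '-') (lower.push cy) (mid.push ' ') s x y
          | none => ("", "", "")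
        else ("", "", "")                       -- Python: implicit None, excluded by Pre_

def print_align (i : Int) (j : Int) (upper : String) (lower : String) (mid : String) (s : List (List (Int × String))) (x : String) (y : String) : String × String × String :=
  printAlignGo ((i+1).toNat + (j+1).toNat) i j upper lower mid s x y

-- ===== PORT B =====
-- Stage 1 of Source B: the while-loop that records moves (tag, i, j); fuel is a totality device only,
-- none stands both for fuel exhaustion (unreachable inside Pre_) and for Source B's 'return None'.
def paTrace : Nat → Int → Int → List (List (Int × String)) → Option (List (Char × Int × Int))
  | 0, _, _, _ => none
  | fuel+1, i, j, s =>
    if i = 0 ∧ j = 0 then some []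
    else if i < 0 ∨ j < 0 then none             -- totality guard only; reachable only outside Pre_
    else
      match (PySem.List.pyGet? s i).bind (fun row => PySem.List.pyGet? row j) with
      | none => none                            -- Python: IndexError, excluded by Pre_
      | some cell =>
        if cell.2 = "dig" then (paTrace fuel (i-1) (j-1) s).map (fun ms => ('d', i, j) :: ms)
        else if cell.2 = "up" ∨ (cell.2 ≠ "left" ∧ j = 0) then (paTrace fuel (i-1) j s).map (fun ms => ('u', i, j) :: ms)
        else if cell.2 = "left" ∨ i = 0 then (paTrace fuel i (j-1) s).map (fun ms => ('l', i, j) :: ms)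
        else none                               -- Python: return None, excluded by Pre_

-- Stage 2 of Source B: the for-loop mapping each move to a column of three characters
-- (none = IndexError in Python, excluded by Pre_).
def paCols : List (Char × Int × Int) → String → String → Option (List (Char × Char × Char))
  | [], _, _ => some []
  | m :: ms, x, y =>
    match (if m.1 = 'd' then
             match PySem.Str.pyGet? x (m.2.2 - 1), PySem.Str.pyGet? y (m.2.1 - 1) with
             | some cu, some cl => some (cu, cl, if cu = cl then '|' else '.')
             | _, _ => none
           else if m.1 = 'u' then
             match PySem.Str.pyGet? y (m.2.1 - 1) with
             | some cl => some ('-', cl, ' ')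
             | none => none
           else
             match PySem.Str.pyGet? x (m.2.2 - 1) with
             | some cu => some (cu, '-', ' ')
             | none => none) with
    | none => none
    | some c => (paCols ms x y).map (fun cs => c :: cs)

-- Source B's final return: reverse the columns and join each component once, appending init[::-1]
def paJoin (cols : List (Char × Char × Char)) (upper lower mid : String) : String × String × String :=
  (String.ofList (cols.reverse.map (fun c => c.1)) ++ pyRev upper,
   String.ofList (cols.reverse.map (fun c => c.2.1)) ++ pyRev lower,
   String.ofList (cols.reverse.map (fun c => c.2.2)) ++ pyRev mid)

def print_align_alt (i : Int) (j : Int) (upper : String) (lower : String) (mid : String) (s : List (List (Int × String))) (x : String) (y : String) : String × String × String :=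
  match paTrace ((i+1).toNat + (j+1).toNat) i j s with
  | none => ("", "", "")
  | some moves =>
    match paCols moves x y with
    | none => ("", "", "")
    | some cols => paJoin cols upper lower mid

-- ===== PRECONDITION & SPEC =====
-- Pre_ admits the trivial start i = j = 0 (immediate return) and otherwise the natural domain: the
-- backtrace rectangle [0..i] x [0..j] lies inside s, i/j fit y/x, and every rectangle cell except the
-- terminal (0,0) carries a direction tag consistent with its position (so the backtrace never indexes
-- out of range and never falls off the final else).  It excludes inputs on which A raises IndexError
-- or returns None (not a str triple); incidentally it also excludes some malformed matrices whose
-- visited path happens to be safe (the rectangle condition constrains unvisited cells too).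
def Pre_print_align (i : Int) (j : Int) (upper : String) (lower : String) (mid : String) (s : List (List (Int × String))) (x : String) (y : String) : Prop :=
  (i = 0 ∧ j = 0) ∨
  (0 ≤ i ∧ 0 ≤ j ∧ i < (s.length : Int) ∧ i ≤ (y.toList.length : Int) ∧ j ≤ (x.toList.length : Int) ∧
   ∀ rp ∈ s.zipIdx, (rp.2 : Int) ≤ i →
     j < (rp.1.length : Int) ∧
     ∀ cp ∈ rp.1.zipIdx, (cp.2 : Int) ≤ j → (0 < rp.2 ∨ 0 < cp.2) →
       (cp.1.2 = "dig" → 0 < rp.2 ∧ 0 < cp.2) ∧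
       (cp.1.2 = "up" → 0 < rp.2) ∧
       (cp.1.2 = "left" → 0 < cp.2) ∧
       (cp.1.2 ≠ "dig" ∧ cp.1.2 ≠ "up" ∧ cp.1.2 ≠ "left" → rp.2 = 0 ∨ cp.2 = 0))
instance (i : Int) (j : Int) (upper : String) (lower : String) (mid : String) (s : List (List (Int × String))) (x : String) (y : String) : Decidable (Pre_print_align i j upper lower mid s x y) := by unfold Pre_print_align; infer_instance

def pvWitness_print_align : Int × Int × String × String × String × (List (List (Int × String))) × String × String :=
  (1, 1, "", "", "", [[(0, ""), (0, "left")], [(0, "up"), (0, "dig")]], "a", "a")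

def Spec_print_align (i : Int) (j : Int) (upper : String) (lower : String) (mid : String) (s : List (List (Int × String))) (x : String) (y : String) (out : String × String × String) : Prop := out = print_align_alt i j upper lower mid s x y
instance (i : Int) (j : Int) (upper : String) (lower : String) (mid : String) (s : List (List (Int × String))) (x : String) (y : String) (out : String × String × String) : Decidable (Spec_print_align i j upper lower mid s x y out) := by unfold Spec_print_align; infer_instance

-- ===== CLAIM (what is proved, stated in full; the proofs are below) =====
def Claim_equal_print_align : Prop := ∀ (i : Int) (j : Int) (upper : String) (lower : String) (mid : String) (s : List (List (Int × String))) (x : String) (y : String), Dom_print_align i j upper lower mid s x y → Pre_print_align i j upper lower mid s x y → Spec_print_align i j upper lower mid s x y (print_align i j upper lower mid s x y)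

-- ===== LEMMAS AND PROOFS =====

lemma pyRev_eq (t : String) : pyRev t = String.ofList t.toList.reverse := by
  simp [pyRev, PySem.Str.slice?, PySem.List.slice?_none_none_neg_one]

lemma paJoin_nil (u l m : String) : paJoin [] u l m = (pyRev u, pyRev l, pyRev m) := by
  simp [paJoin]

lemma paJoin_cons (a b c : Char) (cols : List (Char × Char × Char)) (u l m : String) :
    paJoin ((a, b, c) :: cols) u l m = paJoin cols (u.push a) (l.push b) (m.push c) := by
  unfold paJoin
  refine Prod.ext ?_ (Prod.ext ?_ ?_) <;>
    (apply String.toList_injective; simp [pyRev_eq])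

-- the heart of the equivalence: A's recursion computes trace-then-render
lemma go_eq (s : List (List (Int × String))) (x y : String) :
    ∀ f (i j : Int) (u l m : String),
    printAlignGo f i j u l m s x y =
      match paTrace f i j s with
      | none => ("", "", "")
      | some mvs =>
        match paCols mvs x y with
        | none => ("", "", "")
        | some cols => paJoin cols u l m := by
  intro f
  induction f with
  | zero => intro i j u l m; rfl
  | succ n ih =>
    intro i j u l m
    rw [printAlignGo, paTrace]
    simp only [PySem.Str.pyGet?, PySem.Chars.pyGet?]
    by_cases h0 : i = 0 ∧ j = 0
    · simp [h0, paCols, paJoin_nil]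
    · simp only [if_neg h0]
      by_cases h2 : i < 0 ∨ j < 0
      · simp [h2]
      · simp only [if_neg h2]
        cases hcell : (PySem.List.pyGet? s i).bind (fun row => PySem.List.pyGet? row j) with
        | none => rfl
        | some cell =>
          by_cases hd : cell.2 = "dig"
          · simp only [if_pos hd]
            cases hx : PySem.List.pyGet? x.toList (j - 1) with
            | none =>
              cases ht : paTrace n (i-1) (j-1) s with
              | none => rfl
              | some ms => simp [paCols, PySem.Str.pyGet?, PySem.Chars.pyGet?, hx]
            | some cx =>
              cases hy : PySem.List.pyGet? y.toList (i - 1) with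
              | none =>
                cases ht : paTrace n (i-1) (j-1) s with
                | none => rfl
                | some ms => simp [paCols, PySem.Str.pyGet?, PySem.Chars.pyGet?, hx, hy]
              | some cy =>
                dsimp only
                rw [ih (i-1) (j-1)]
                cases ht : paTrace n (i-1) (j-1) s with
                | none => rfl
                | some ms =>
                  cases hc : paCols ms x y with
                  | none => simp [paCols, PySem.Str.pyGet?, PySem.Chars.pyGet?, hx, hy, hc]
                  | some cols => simp [paCols, PySem.Str.pyGet?, PySem.Chars.pyGet?, hx, hy, hc, paJoin_cons]
          · simp only [if_neg hd]
            by_cases hup : cell.2 = "up"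
            · simp only [if_pos hup, if_pos (Or.inl hup)]
              cases hy : PySem.List.pyGet? y.toList (i - 1) with
              | none =>
                cases ht : paTrace n (i-1) j s with
                | none => rfl
                | some ms => simp [paCols, PySem.Str.pyGet?, PySem.Chars.pyGet?, hy]
              | some cy =>
                dsimp only
                rw [ih (i-1) j]
                cases ht : paTrace n (i-1) j s with
                | none => rfl
                | some ms =>
                  cases hc : paCols ms x y with
                  | none => simp [paCols, PySem.Str.pyGet?, PySem.Chars.pyGet?, hy, hc]
                  | some cols => simp [paCols, PySem.Str.pyGet?, PySem.Chars.pyGet?, hy, hc, paJoin_cons]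
            · simp only [if_neg hup]
              by_cases hl : cell.2 = "left"
              · have hb2 : ¬ (cell.2 = "up" ∨ (cell.2 ≠ "left" ∧ j = 0)) := by simp [hl]
                simp only [if_neg hb2, if_pos hl, if_pos (Or.inl hl)]
                cases hx : PySem.List.pyGet? x.toList (j - 1) with
                | none =>
                  cases ht : paTrace n i (j-1) s with
                  | none => rfl
                  | some ms => simp [paCols, PySem.Str.pyGet?, PySem.Chars.pyGet?, hx]
                | some cx =>
                  dsimp only
                  rw [ih i (j-1)]
                  cases ht : paTrace n i (j-1) s with
                  | none => rfl
                  | some ms =>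
                    cases hc : paCols ms x y with
                    | none => simp [paCols, PySem.Str.pyGet?, PySem.Chars.pyGet?, hx, hc]
                    | some cols => simp [paCols, PySem.Str.pyGet?, PySem.Chars.pyGet?, hx, hc, paJoin_cons]
              · simp only [if_neg hl]
                by_cases hj0 : j = 0
                · -- unknown tag, j = 0 (so i ≠ 0): A takes its j == 0 sub-branch, B tags 'u'
                  have hi0 : ¬ i = 0 := by intro hi0; exact h0 ⟨hi0, hj0⟩
                  have hb2 : cell.2 = "up" ∨ (cell.2 ≠ "left" ∧ j = 0) := Or.inr ⟨hl, hj0⟩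
                  simp only [if_pos hb2, if_neg hi0, if_pos hj0]
                  cases hy : PySem.List.pyGet? y.toList (i - 1) with
                  | none =>
                    cases ht : paTrace n (i-1) j s with
                    | none => rfl
                    | some ms => simp [paCols, PySem.Str.pyGet?, PySem.Chars.pyGet?, hy]
                  | some cy =>
                    dsimp only
                    rw [ih (i-1) j]
                    cases ht : paTrace n (i-1) j s with
                    | none => rfl
                    | some ms =>
                      cases hc : paCols ms x y with
                      | none => simp [paCols, PySem.Str.pyGet?, PySem.Chars.pyGet?, hy, hc]
                      | some cols => simp [paCols, PySem.Str.pyGet?, PySem.Chars.pyGet?, hy, hc, paJoin_cons]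
                · have hb2 : ¬ (cell.2 = "up" ∨ (cell.2 ≠ "left" ∧ j = 0)) := by simp [hup, hj0]
                  simp only [if_neg hb2]
                  by_cases hi0 : i = 0
                  · simp only [if_pos (Or.inr hi0), if_pos hi0]
                    cases hx : PySem.List.pyGet? x.toList (j - 1) with
                    | none =>
                      cases ht : paTrace n i (j-1) s with
                      | none => rfl
                      | some ms => simp [paCols, PySem.Str.pyGet?, PySem.Chars.pyGet?, hx]
                    | some cx =>
                      dsimp only
                      rw [ih i (j-1)]
                      cases ht : paTrace n i (j-1) s with
                      | none => rfl
                      | some ms =>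
                        cases hc : paCols ms x y with
                        | none => simp [paCols, PySem.Str.pyGet?, PySem.Chars.pyGet?, hx, hc]
                        | some cols => simp [paCols, PySem.Str.pyGet?, PySem.Chars.pyGet?, hx, hc, paJoin_cons]
                  · have hb3 : ¬ (cell.2 = "left" ∨ i = 0) := by simp [hl, hi0]
                    simp only [if_neg hb3, if_neg hi0, if_neg hj0]

-- ===== VERDICT (by name: the statement is the Claim_ definition above) =====
theorem print_align_spec : Claim_equal_print_align := by
  intro i j upper lower mid s x y _hdom _hpre
  unfold Spec_print_align print_align_alt print_align
  rw [go_eq s x y ((i+1).toNat + (j+1).toNat) i j upper lower mid]
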